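-- pv_equiv track=rewrite | github.com/Zaid-Zaki/RAG | scrapping.py | separate_headings_paragraphs
-- ===== SOURCE A (Python) =====
-- def separate_headings_paragraphs(data_dict):
--     headings = []
--     paragraphs = []
--     div_text = []
--     multilingual_text = []
--     images = []
--     sections = []
--     Footers = []
--     Headers = []
--     NestedDivs = []
--     divWithIds=[]
--
--     for url, content in data_dict.items():
--         if "Headings" in content:
--             headings.extend(content["Headings"])
--         if "Paragraphs" in content:
--             paragraphs.extend(content["Paragraphs"])
--         if "Div Texts" in content:
--             div_text.extend(content["Div Texts"])
--         if "Images" in content: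
--             images.extend(content["Images"])
--         if "Multilingual Texts" in content:
--             multilingual_text.extend(content["Multilingual Texts"])
--         if 'Sections' in content:
--             sections.extend(content["Sections"])
--         if 'Footers' in content:
--             Footers.extend(content["Footers"])
--         if 'Headers' in content:
--             Headers.extend(content["Headers"])
--         if 'Nested Divs' in content:
--             NestedDivs.extend(content["Nested Divs"])
--         if 'All Divs Texts' in content:
--             divWithIds.extend(content['All Divs Texts'])
--
--     return headings, paragraphs, div_text, images, multilingual_text, sections, Footers, Headers, NestedDivs,divWithIds
-- ===== SOURCE B (Python) =====
-- CATS = ("Headings", "Paragraphs", "Div Texts", "Images", "Multilingual Texts",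
--         "Sections", "Footers", "Headers", "Nested Divs", "All Divs Texts")
--
--
-- def separate_headings_paragraphs(data_dict):
--     # Flatten everything into one tagged (category_key, item) stream,
--     # then partition that stream by the ten category names.
--     pairs = [(k, x)
--              for content in data_dict.values()
--              for k, xs in content.items()
--              for x in xs]
--     return tuple([x for k, x in pairs if k == c] for c in CATS)
-- ===== Notes on version B (the rewrite author's own statement) =====
-- stated objective: alternative
-- what changed: Replaces the url-major loop with ten named accumulators and ten if/extend key lookups by flattening all contents into a single tagged (key, item) stream and then partitioning that stream with one filter per category; no dict lookups remain.
import Mathlib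
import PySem

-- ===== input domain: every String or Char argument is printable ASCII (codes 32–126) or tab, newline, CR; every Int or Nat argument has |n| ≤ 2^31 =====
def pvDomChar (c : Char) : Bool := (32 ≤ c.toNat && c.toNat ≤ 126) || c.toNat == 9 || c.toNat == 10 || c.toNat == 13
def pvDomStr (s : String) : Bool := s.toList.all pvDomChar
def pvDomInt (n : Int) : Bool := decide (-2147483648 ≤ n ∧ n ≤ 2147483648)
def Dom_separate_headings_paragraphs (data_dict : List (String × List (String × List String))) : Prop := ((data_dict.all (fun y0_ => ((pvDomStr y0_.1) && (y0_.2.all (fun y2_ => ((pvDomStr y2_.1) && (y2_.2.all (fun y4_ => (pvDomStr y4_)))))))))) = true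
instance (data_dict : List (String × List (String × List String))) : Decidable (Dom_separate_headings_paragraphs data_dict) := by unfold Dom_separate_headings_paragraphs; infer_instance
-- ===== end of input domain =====

-- ===== PORT A =====
-- B flattens all contents into one tagged (key, item) stream and partitions it by category
-- (alternative traversal, same cost); return value proved equal on dict-shaped inputs.
-- first-match lookup in the content association list (Python dict membership/indexing)
def pvGetC (c : List (String × List String)) (k : String) : Option (List String) :=
  c.lookup k

def pvStepA (st : List String × List String × List String × List String × List String × List String × List String × List String × List String × List String)
    (kv : String × List (String × List String)) :
    List String × List String × List String × List String × List String × List String × List String × List String × List String × List String :=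
  let c := kv.2
  let (hs, ps, dt, im, ml, se, fo, he, nd, di) := st
  let hs := if (pvGetC c "Headings").isSome then hs ++ (pvGetC c "Headings").getD [] else hs
  let ps := if (pvGetC c "Paragraphs").isSome then ps ++ (pvGetC c "Paragraphs").getD [] else ps
  let dt := if (pvGetC c "Div Texts").isSome then dt ++ (pvGetC c "Div Texts").getD [] else dt
  let im := if (pvGetC c "Images").isSome then im ++ (pvGetC c "Images").getD [] else im
  let ml := if (pvGetC c "Multilingual Texts").isSome then ml ++ (pvGetC c "Multilingual Texts").getD [] else ml
  let se := if (pvGetC c "Sections").isSome then se ++ (pvGetC c "Sections").getD [] else se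
  let fo := if (pvGetC c "Footers").isSome then fo ++ (pvGetC c "Footers").getD [] else fo
  let he := if (pvGetC c "Headers").isSome then he ++ (pvGetC c "Headers").getD [] else he
  let nd := if (pvGetC c "Nested Divs").isSome then nd ++ (pvGetC c "Nested Divs").getD [] else nd
  let di := if (pvGetC c "All Divs Texts").isSome then di ++ (pvGetC c "All Divs Texts").getD [] else di
  (hs, ps, dt, im, ml, se, fo, he, nd, di)

def separate_headings_paragraphs (data_dict : List (String × List (String × List String))) : List String × List String × List String × List String × List String × List String × List String × List String × List String × List String :=
  data_dict.foldl pvStepA ([], [], [], [], [], [], [], [], [], [])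

-- ===== PORT B =====
-- the flat tagged stream: [(k, x) for content in values for (k, xs) in content.items() for x in xs]
def pvPairs (data_dict : List (String × List (String × List String))) : List (String × String) :=
  data_dict.flatMap (fun kv => kv.2.flatMap (fun it => it.2.map (fun x => (it.1, x))))

-- [x for k, x in pairs if k == c]
def pvPart (pairs : List (String × String)) (c : String) : List String :=
  (pairs.filter (fun p => p.1 == c)).map Prod.snd

def separate_headings_paragraphs_alt (data_dict : List (String × List (String × List String))) : List String × List String × List String × List String × List String × List String × List String × List String × List String × List String :=
  let pairs := pvPairs data_dict
  (pvPart pairs "Headings", pvPart pairs "Paragraphs", pvPart pairs "Div Texts",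
   pvPart pairs "Images", pvPart pairs "Multilingual Texts", pvPart pairs "Sections",
   pvPart pairs "Footers", pvPart pairs "Headers", pvPart pairs "Nested Divs",
   pvPart pairs "All Divs Texts")

-- ===== PRECONDITION & SPEC =====
-- Pre_ excludes association lists in which some content has duplicate category keys: those do
-- not represent any Python dict (Python dicts cannot hold duplicate keys), so A's first-match
-- behaviour there is an artefact of the encoding.
def Pre_separate_headings_paragraphs (data_dict : List (String × List (String × List String))) : Prop :=
  ∀ kv ∈ data_dict, (kv.2.map Prod.fst).Nodup
instance (data_dict : List (String × List (String × List String))) : Decidable (Pre_separate_headings_paragraphs data_dict) := by unfold Pre_separate_headings_paragraphs; infer_instance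

def pvWitness_separate_headings_paragraphs : (List (String × List (String × List String))) :=
  [("u", [("Headings", ["h1", "h2"]), ("Images", ["i"]), ("Other", ["x"])]),
   ("v", [("Paragraphs", ["p"]), ("Headings", ["h3"])])]

def Spec_separate_headings_paragraphs (data_dict : List (String × List (String × List String))) (out : List String × List String × List String × List String × List String × List String × List String × List String × List String × List String) : Prop := out = separate_headings_paragraphs_alt data_dict
instance (data_dict : List (String × List (String × List String))) (out : List String × List String × List String × List String × List String × List String × List String × List String × List String × List String) : Decidable (Spec_separate_headings_paragraphs data_dict out) := by
  unfold Spec_separate_headings_paragraphs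
  letI d2 : DecidableEq (List String × List String) := instDecidableEqProd
  letI d3 : DecidableEq (List String × List String × List String) := instDecidableEqProd
  letI d4 : DecidableEq (List String × List String × List String × List String) := instDecidableEqProd
  letI d5 : DecidableEq (List String × List String × List String × List String × List String) := instDecidableEqProd
  letI d6 : DecidableEq (List String × List String × List String × List String × List String × List String) := instDecidableEqProd
  letI d7 : DecidableEq (List String × List String × List String × List String × List String × List String × List String) := instDecidableEqProd
  letI d8 : DecidableEq (List String × List String × List String × List String × List String × List String × List String × List String) := instDecidableEqProd
  letI d9 : DecidableEq (List String × List String × List String × List String × List String × List String × List String × List String × List String) := instDecidableEqProd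
  letI d10 : DecidableEq (List String × List String × List String × List String × List String × List String × List String × List String × List String × List String) := instDecidableEqProd
  exact d10 out (separate_headings_paragraphs_alt data_dict)

-- ===== CLAIM (what is proved, stated in full; the proofs are below) =====
def Claim_equal_separate_headings_paragraphs : Prop := ∀ (data_dict : List (String × List (String × List String))), Dom_separate_headings_paragraphs data_dict → Pre_separate_headings_paragraphs data_dict → Spec_separate_headings_paragraphs data_dict (separate_headings_paragraphs data_dict)

-- ===== LEMMAS AND PROOFS =====

-- A's per-url total for one category, as first-match lookup
def pvBucketA (data_dict : List (String × List (String × List String))) (cat : String) : List String :=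
  data_dict.flatMap (fun kv => ((kv.2.lookup cat).getD []))

-- each branch of A's step appends exactly the (possibly empty) looked-up list
theorem pvExtend_eq (c : List (String × List String)) (k : String) (acc : List String) :
    (if (pvGetC c k).isSome then acc ++ (pvGetC c k).getD [] else acc)
      = acc ++ (c.lookup k).getD [] := by
  unfold pvGetC
  cases c.lookup k <;> simp

theorem foldlA_eq (data_dict : List (String × List (String × List String)))
    (hs ps dt im ml se fo he nd di : List String) :
    data_dict.foldl pvStepA (hs, ps, dt, im, ml, se, fo, he, nd, di)
      = (hs ++ pvBucketA data_dict "Headings", ps ++ pvBucketA data_dict "Paragraphs",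
         dt ++ pvBucketA data_dict "Div Texts", im ++ pvBucketA data_dict "Images",
         ml ++ pvBucketA data_dict "Multilingual Texts", se ++ pvBucketA data_dict "Sections",
         fo ++ pvBucketA data_dict "Footers", he ++ pvBucketA data_dict "Headers",
         nd ++ pvBucketA data_dict "Nested Divs", di ++ pvBucketA data_dict "All Divs Texts") := by
  induction data_dict generalizing hs ps dt im ml se fo he nd di with
  | nil => simp [pvBucketA]
  | cons kv rest ih =>
    simp only [List.foldl_cons, pvStepA, pvExtend_eq]
    rw [ih]
    simp [pvBucketA, List.append_assoc]

-- filtering the tagged stream of one content for a key not among its keys gives nothing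
theorem pvPart_stream_nil (c : List (String × List String)) (cat : String)
    (h : ∀ it ∈ c, it.1 ≠ cat) :
    pvPart (c.flatMap (fun it => it.2.map (fun x => (it.1, x)))) cat = [] := by
  induction c with
  | nil => simp [pvPart]
  | cons it rest ih =>
    have hne : it.1 ≠ cat := h it (by simp)
    simp only [List.flatMap_cons, pvPart, List.filter_append, List.map_append] at *
    rw [List.filter_map]
    have : (it.2.filter (fun x => ((fun p => p.1 == cat) ∘ (fun x => (it.1, x))) x)) = [] := by
      simp [Function.comp, hne]
    rw [this]
    simp only [List.map_nil, List.nil_append]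
    exact ih (fun a ha => h a (by simp [ha]))

-- with distinct keys, filtering one content's tagged stream equals the first-match lookup
theorem pvPart_stream_eq (c : List (String × List String)) (cat : String)
    (hnd : (c.map Prod.fst).Nodup) :
    pvPart (c.flatMap (fun it => it.2.map (fun x => (it.1, x)))) cat
      = (c.lookup cat).getD [] := by
  induction c with
  | nil => simp [pvPart]
  | cons it rest ih =>
    simp only [List.map_cons, List.nodup_cons] at hnd
    by_cases hk : it.1 = cat
    · subst hk
      simp only [List.flatMap_cons, pvPart, List.filter_append, List.map_append]
      rw [List.filter_map]
      have h1 : (it.2.filter (fun x => ((fun p => p.1 == it.1) ∘ (fun x => (it.1, x))) x)) = it.2 := by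
        simp [Function.comp]
      rw [h1]
      have h2 : pvPart (rest.flatMap (fun it' => it'.2.map (fun x => (it'.1, x)))) it.1 = [] := by
        apply pvPart_stream_nil
        intro it' hm heq
        exact hnd.1 (heq ▸ (List.mem_map.mpr ⟨it', hm, rfl⟩))
      unfold pvPart at h2
      rw [List.map_map, h2]
      simp [List.lookup]
    · simp only [List.flatMap_cons, pvPart, List.filter_append, List.map_append]
      rw [List.filter_map]
      have h1 : (it.2.filter (fun x => ((fun p => p.1 == cat) ∘ (fun x => (it.1, x))) x)) = [] := by
        simp [Function.comp, hk]
      rw [h1]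
      simp only [List.map_nil, List.nil_append]
      unfold pvPart at ih
      rw [ih hnd.2]
      have hk' : (cat == it.1) = false := beq_eq_false_iff_ne.mpr (Ne.symm hk)
      simp [List.lookup, hk']

-- with every content's keys distinct, each of B's partitions equals A's per-category total
theorem pvPart_eq_bucketA (data_dict : List (String × List (String × List String)))
    (hpre : ∀ kv ∈ data_dict, (kv.2.map Prod.fst).Nodup) (cat : String) :
    pvPart (pvPairs data_dict) cat = pvBucketA data_dict cat := by
  induction data_dict with
  | nil => simp [pvPairs, pvPart, pvBucketA]
  | cons kv rest ih =>
    simp only [pvPairs, List.flatMap_cons, pvPart, List.filter_append, List.map_append,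
      pvBucketA] at *
    have h1 := pvPart_stream_eq kv.2 cat (hpre kv (by simp))
    unfold pvPart at h1
    rw [h1, ih (fun a ha => hpre a (by simp [ha]))]

-- ===== VERDICT (by name: the statement is the Claim_ definition above) =====
theorem separate_headings_paragraphs_spec : Claim_equal_separate_headings_paragraphs := by
  intro data_dict _ hpre
  unfold Spec_separate_headings_paragraphs separate_headings_paragraphs separate_headings_paragraphs_alt
  rw [foldlA_eq]
  simp only [List.nil_append]
  rw [pvPart_eq_bucketA _ hpre, pvPart_eq_bucketA _ hpre, pvPart_eq_bucketA _ hpre,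
      pvPart_eq_bucketA _ hpre, pvPart_eq_bucketA _ hpre, pvPart_eq_bucketA _ hpre,
      pvPart_eq_bucketA _ hpre, pvPart_eq_bucketA _ hpre, pvPart_eq_bucketA _ hpre,
      pvPart_eq_bucketA _ hpre]
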